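-- pv_equiv track=rewrite | github.com/fabioladearizondecallatay/PyRisk | juego.py | calcular_victorias
-- ===== SOURCE A (Python) =====
-- def calcular_victorias(combinacion, tablero, orden):
--     victorias = 0
--     fuerza_total = sum(combinacion)  # Suma la fuerza total de las tropas
--     for territorio in orden:
--         if fuerza_total > tablero[territorio]["Defensa"]:
--             victorias += 1  # Cuenta el territorio como conquistado
--             fuerza_total -= tablero[territorio]["Defensa"]  # Reduce la fuerza restante
--         else:
--             break  # Si no puedes conquistar un territorio, detén el ataque
--     return victorias, []
-- ===== SOURCE B (Python) =====
-- from bisect import bisect_left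
-- from itertools import accumulate
--
-- def calcular_victorias(combinacion, tablero, orden):
--     total = sum(combinacion)
--     # Prefix sums of defenses along orden, then their running maxima: a
--     # nondecreasing table on which the answer is a binary-search position.
--     prefijos = list(accumulate(tablero[t]["Defensa"] for t in orden))
--     maximos = list(accumulate(prefijos, max))
--     return bisect_left(maximos, total), []
-- ===== Notes on version B (the rewrite author's own statement) =====
-- stated objective: alternative
-- what changed: Replaces A's decrement-and-break early-exit scan with an eager staged computation: build the prefix-sum table of defenses, take its running maxima (a nondecreasing table), and locate the answer by binary search (bisect_left) for the fixed total force.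
-- outside the precondition, e.g. on calcular_victorias([0], {'a': {'Defensa': 1}}, ['a', 'b']): A returns (0, []), B raises KeyError
import Mathlib
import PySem

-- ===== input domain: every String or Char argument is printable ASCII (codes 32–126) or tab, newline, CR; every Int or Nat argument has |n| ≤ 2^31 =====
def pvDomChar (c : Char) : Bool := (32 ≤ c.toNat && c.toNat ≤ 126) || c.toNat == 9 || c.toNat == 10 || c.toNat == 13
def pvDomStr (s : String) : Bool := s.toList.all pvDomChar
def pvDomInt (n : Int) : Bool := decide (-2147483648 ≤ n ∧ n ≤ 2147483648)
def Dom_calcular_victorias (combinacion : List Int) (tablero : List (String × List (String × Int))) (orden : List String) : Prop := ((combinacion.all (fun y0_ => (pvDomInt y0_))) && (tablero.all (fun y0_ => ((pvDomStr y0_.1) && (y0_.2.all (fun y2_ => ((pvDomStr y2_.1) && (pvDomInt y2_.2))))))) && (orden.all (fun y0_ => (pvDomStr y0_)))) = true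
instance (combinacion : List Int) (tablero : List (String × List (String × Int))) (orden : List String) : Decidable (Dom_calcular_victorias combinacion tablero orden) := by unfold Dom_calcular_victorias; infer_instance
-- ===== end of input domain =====

-- B replaces A's decrement-and-break early-exit scan with staged tables: prefix sums of the
-- defenses, their running maxima, then a binary search (bisect_left) for the fixed total force
-- (objective: alternative decomposition, not claimed faster).


-- ===== PORT A =====
-- tablero[t]["Defensa"]: first-match association-list lookup (dict lookup); none = KeyError.
def pvDefensa? (tablero : List (String × List (String × Int))) (t : String) : Option Int :=
  (List.lookup t tablero).bind (fun d => List.lookup "Defensa" d)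

-- the for-loop of A: state (victorias, fuerza_total); 'break' returns; KeyError unreachable under Pre_.
def pvLoopA (tablero : List (String × List (String × Int))) (victorias fuerza : Int) : List String → Int × List Int
  | [] => (victorias, [])
  | t :: rest =>
    match pvDefensa? tablero t with
    | none => (victorias, [])  -- Python raises KeyError here; excluded by Pre_
    | some d => if fuerza > d then pvLoopA tablero (victorias + 1) (fuerza - d) rest else (victorias, [])

def calcular_victorias (combinacion : List Int) (tablero : List (String × List (String × Int))) (orden : List String) : Int × List Int :=
  pvLoopA tablero 0 combinacion.sum orden

-- ===== PORT B =====
-- itertools.accumulate(gen): prefix sums of the defense values along orden.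
def pvAccumulate (acc : Int) : List Int → List Int
  | [] => []
  | d :: ds => (acc + d) :: pvAccumulate (acc + d) ds

-- itertools.accumulate(prefijos, max): running maxima.
def pvRunMax1 (m : Int) : List Int → List Int
  | [] => []
  | d :: ds => (max m d) :: pvRunMax1 (max m d) ds

def pvRunMax : List Int → List Int
  | [] => []
  | d :: ds => d :: pvRunMax1 d ds

-- bisect.bisect_left(a, x) with lo = 0, hi = len(a); mid is always in range, so getD is exact.
def pvBisect (a : List Int) (x : Int) (lo hi : Nat) : Nat :=
  if lo < hi then
    let mid := (lo + hi) / 2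
    if a.getD mid 0 < x then pvBisect a x (mid + 1) hi else pvBisect a x lo mid
  else lo
termination_by hi - lo
decreasing_by all_goals omega

def calcular_victorias_alt (combinacion : List Int) (tablero : List (String × List (String × Int))) (orden : List String) : Int × List Int :=
  let total := combinacion.sum
  let prefijos := pvAccumulate 0 (orden.map (fun t => (pvDefensa? tablero t).getD 0))
  let maximos := pvRunMax prefijos
  ((pvBisect maximos total 0 maximos.length : Int), [])

-- ===== PRECONDITION & SPEC =====
-- Pre_ excludes inputs where some territory in orden has no tablero entry with a "Defensa" key:
-- A raises KeyError as soon as its loop reaches such a territory, and B's eager table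
-- construction raises KeyError on any such input (even when A's loop breaks first).
def Pre_calcular_victorias (combinacion : List Int) (tablero : List (String × List (String × Int))) (orden : List String) : Prop :=
  (orden.all (fun t => (pvDefensa? tablero t).isSome)) = true
instance (combinacion : List Int) (tablero : List (String × List (String × Int))) (orden : List String) : Decidable (Pre_calcular_victorias combinacion tablero orden) := by unfold Pre_calcular_victorias; infer_instance

def pvWitness_calcular_victorias : List Int × (List (String × List (String × Int))) × List String :=
  ([5], [("a", [("Defensa", 1)]), ("b", [("Defensa", 3)])], ["a", "b"])

def Spec_calcular_victorias (combinacion : List Int) (tablero : List (String × List (String × Int))) (orden : List String) (out : Int × List Int) : Prop := out = calcular_victorias_alt combinacion tablero orden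
instance (combinacion : List Int) (tablero : List (String × List (String × Int))) (orden : List String) (out : Int × List Int) : Decidable (Spec_calcular_victorias combinacion tablero orden out) := by unfold Spec_calcular_victorias; infer_instance

-- ===== CLAIM (what is proved, stated in full; the proofs are below) =====
def Claim_equal_calcular_victorias : Prop := ∀ (combinacion : List Int) (tablero : List (String × List (String × Int))) (orden : List String), Dom_calcular_victorias combinacion tablero orden → Pre_calcular_victorias combinacion tablero orden → Spec_calcular_victorias combinacion tablero orden (calcular_victorias combinacion tablero orden)

-- ===== LEMMAS AND PROOFS =====
-- Loop invariant: with remaining force total - c, A's loop adds exactly the length of the leading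
-- run of cumulative defenses (starting from c) that stay below total.
theorem pvLoop_eq_takeWhile (tablero : List (String × List (String × Int))) (total : Int) :
    ∀ (o : List String) (v c : Int), (∀ t ∈ o, (pvDefensa? tablero t).isSome) →
      pvLoopA tablero v (total - c) o =
        (v + ((pvAccumulate c (o.map (fun t => (pvDefensa? tablero t).getD 0))).takeWhile
              (fun x => decide (x < total))).length, []) := by
  intro o
  induction o with
  | nil => intro v c _; simp [pvLoopA, pvAccumulate]
  | cons t rest ih =>
    intro v c h
    have ht : (pvDefensa? tablero t).isSome := h t (by simp)
    obtain ⟨d, hd⟩ := Option.isSome_iff_exists.mp ht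
    simp only [pvLoopA, hd, List.map_cons, Option.getD_some, pvAccumulate, List.takeWhile]
    by_cases hc : total - c > d
    · have hc' : c + d < total := by omega
      have := ih (v + 1) (c + d) (fun t' ht' => h t' (by simp [ht']))
      rw [show total - (c + d) = total - c - d by ring] at this
      simp only [hc, if_true, this, hc', decide_true, List.length_cons]
      refine Prod.ext ?_ rfl
      push_cast; ring
    · have hc' : ¬ c + d < total := by omega
      simp [hc, hc']

-- Taking the leading run below x is unchanged by passing to running maxima.
theorem tw_runmax1 (x : Int) :
    ∀ (p : List Int) (m : Int), m < x →
      ((pvRunMax1 m p).takeWhile (fun c => decide (c < x))).length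
        = (p.takeWhile (fun c => decide (c < x))).length := by
  intro p
  induction p with
  | nil => intro m _; simp [pvRunMax1]
  | cons d ds ih =>
    intro m hm
    by_cases hd : d < x
    · have h1 : max m d < x := max_lt hm hd
      simp [pvRunMax1, List.takeWhile, hd, h1, ih (max m d) h1]
    · have h1 : ¬ max m d < x := fun h => hd (lt_of_le_of_lt (le_max_right m d) h)
      simp [pvRunMax1, List.takeWhile, hd, h1]

theorem tw_runmax (x : Int) (p : List Int) :
    ((pvRunMax p).takeWhile (fun c => decide (c < x))).length
      = (p.takeWhile (fun c => decide (c < x))).length := by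
  cases p with
  | nil => simp [pvRunMax]
  | cons d ds =>
    by_cases hd : d < x
    · simp [pvRunMax, List.takeWhile, hd, tw_runmax1 x ds d hd]
    · simp [pvRunMax, List.takeWhile, hd]

-- every element of pvRunMax1 m p is ≥ m
theorem runmax1_ge : ∀ (p : List Int) (m : Int) (i : Nat), i < (pvRunMax1 m p).length →
    m ≤ (pvRunMax1 m p).getD i 0 := by
  intro p
  induction p with
  | nil => intro m i h; simp [pvRunMax1] at h
  | cons d ds ih =>
    intro m i h
    cases i with
    | zero => simp [pvRunMax1]
    | succ j =>
      simp only [pvRunMax1, List.length_cons] at h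
      have := ih (max m d) j (by omega)
      simp only [pvRunMax1, List.getD_cons_succ]
      exact le_trans (le_max_left m d) this

theorem runmax1_mono : ∀ (p : List Int) (m : Int) (i j : Nat), i ≤ j → j < (pvRunMax1 m p).length →
    (pvRunMax1 m p).getD i 0 ≤ (pvRunMax1 m p).getD j 0 := by
  intro p
  induction p with
  | nil => intro m i j _ h; simp [pvRunMax1] at h
  | cons d ds ih =>
    intro m i j hij hj
    cases i with
    | zero =>
      cases j with
      | zero => exact le_refl _
      | succ j' =>
        simp only [pvRunMax1, List.length_cons] at hj
        simp only [pvRunMax1, List.getD_cons_zero, List.getD_cons_succ]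
        exact runmax1_ge ds (max m d) j' (by omega)
    | succ i' =>
      cases j with
      | zero => omega
      | succ j' =>
        simp only [pvRunMax1, List.length_cons] at hj
        simp only [pvRunMax1, List.getD_cons_succ]
        exact ih (max m d) i' j' (by omega) (by omega)

theorem runmax_mono (p : List Int) : ∀ (i j : Nat), i ≤ j → j < (pvRunMax p).length →
    (pvRunMax p).getD i 0 ≤ (pvRunMax p).getD j 0 := by
  cases p with
  | nil => intro i j _ h; simp [pvRunMax] at h
  | cons d ds =>
    intro i j hij hj
    cases i with
    | zero =>
      cases j with
      | zero => exact le_refl _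
      | succ j' =>
        simp only [pvRunMax, List.length_cons] at hj
        simp only [pvRunMax, List.getD_cons_zero, List.getD_cons_succ]
        exact runmax1_ge ds d j' (by omega)
    | succ i' =>
      cases j with
      | zero => omega
      | succ j' =>
        simp only [pvRunMax, List.length_cons] at hj
        simp only [pvRunMax, List.getD_cons_succ]
        exact runmax1_mono ds d i' j' (by omega) (by omega)

-- the takeWhile length is the boundary index n when everything before is < x and a[n] (if any) is not
theorem tw_length_eq (x : Int) : ∀ (a : List Int) (n : Nat), n ≤ a.length →
    (∀ i, i < n → a.getD i 0 < x) → (∀ i, n ≤ i → i < a.length → ¬ a.getD i 0 < x) →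
    (a.takeWhile (fun c => decide (c < x))).length = n := by
  intro a
  induction a with
  | nil => intro n hn _ _; simp at hn; simp [hn]
  | cons d ds ih =>
    intro n hn hlo hhi
    cases n with
    | zero =>
      have h0 : ¬ d < x := by simpa using hhi 0 (by omega) (by simp)
      simp [List.takeWhile, h0]
    | succ m =>
      have h0 : d < x := by simpa using hlo 0 (by omega)
      simp only [List.takeWhile, h0, decide_true, List.length_cons]
      have := ih m (by simpa using hn)
        (fun i hi => by simpa using hlo (i + 1) (by omega))
        (fun i hi hil => by simpa using hhi (i + 1) (by omega) (by simpa using hil))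
      omega

-- bisect_left on a nondecreasing table returns the boundary of the leading run below x
theorem pvBisect_eq (a : List Int) (x : Int)
    (hmono : ∀ i j, i ≤ j → j < a.length → a.getD i 0 ≤ a.getD j 0) :
    ∀ (n lo hi : Nat), hi - lo ≤ n → lo ≤ hi → hi ≤ a.length →
      (∀ i, i < lo → a.getD i 0 < x) → (∀ i, hi ≤ i → i < a.length → ¬ a.getD i 0 < x) →
      pvBisect a x lo hi = (a.takeWhile (fun c => decide (c < x))).length := by
  intro n
  induction n with
  | zero =>
    intro lo hi hfuel hlh hha hlo hhi
    have : lo = hi := by omega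
    subst this
    rw [pvBisect]
    simp only [lt_irrefl, if_false]
    exact (tw_length_eq x a lo hha hlo hhi).symm
  | succ k ih =>
    intro lo hi hfuel hlh hha hlo hhi
    rw [pvBisect]
    by_cases hlt : lo < hi
    · simp only [hlt, if_true]
      by_cases hmid : a.getD ((lo + hi) / 2) 0 < x
      · simp only [hmid, if_true]
        refine ih ((lo + hi) / 2 + 1) hi (by omega) (by omega) hha ?_ hhi
        intro i hi'
        exact lt_of_le_of_lt (hmono i ((lo + hi) / 2) (by omega) (by omega)) hmid
      · simp only [hmid, if_false]
        refine ih lo ((lo + hi) / 2) (by omega) (by omega) (by omega) hlo ?_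
        intro i hi' hil h
        exact hmid (lt_of_le_of_lt (hmono ((lo + hi) / 2) i (by omega) hil) h)
    · simp only [hlt, if_false]
      have : lo = hi := by omega
      subst this
      exact (tw_length_eq x a lo hha hlo hhi).symm

-- ===== VERDICT (by name: the statement is the Claim_ definition above) =====
theorem calcular_victorias_spec : Claim_equal_calcular_victorias := by
  intro combinacion tablero orden _ hpre
  unfold Spec_calcular_victorias calcular_victorias calcular_victorias_alt
  have h : ∀ t ∈ orden, (pvDefensa? tablero t).isSome := by
    intro t ht
    exact List.all_eq_true.mp hpre t ht
  have hA := pvLoop_eq_takeWhile tablero combinacion.sum orden 0 0 h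
  simp only [sub_zero] at hA
  rw [hA]
  have hp := tw_runmax combinacion.sum
    (pvAccumulate 0 (orden.map (fun t => (pvDefensa? tablero t).getD 0)))
  have hb := pvBisect_eq (pvRunMax (pvAccumulate 0 (orden.map (fun t => (pvDefensa? tablero t).getD 0))))
    combinacion.sum
    (runmax_mono _)
    (pvRunMax (pvAccumulate 0 (orden.map (fun t => (pvDefensa? tablero t).getD 0)))).length
    0 _ (by omega) (by omega) (le_refl _)
    (by intro i hi; omega)
    (by intro i hi hil; omega)
  simp only [hb, hp]
  norm_num
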